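-- pv_equiv track=rewrite | github.com/Taeg92/Problem_solving | SWEA/D3/SWEA_1493.py | find_n
-- ===== SOURCE A (Python) =====
-- def find_n(a,b):
--     x = 1
--     y = 1
--     cnt = 1
--     while 1:
--         if y < 1:
--             y = x
--             x = 1
--         if x == a and y == b:
--             break
--         x += 1
--         y -= 1
--         cnt += 1
--     return cnt
-- ===== SOURCE B (Python) =====
-- def find_n(a, b):
--     d = a + b - 2
--     return d * (d + 1) // 2 + a
-- ===== Notes on version B (the rewrite author's own statement) =====
-- stated objective: faster
-- what changed: Replaces the step-by-step diagonal walk with the closed form: triangular number of the diagonal index plus the offset within the diagonal.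
import Mathlib
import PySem

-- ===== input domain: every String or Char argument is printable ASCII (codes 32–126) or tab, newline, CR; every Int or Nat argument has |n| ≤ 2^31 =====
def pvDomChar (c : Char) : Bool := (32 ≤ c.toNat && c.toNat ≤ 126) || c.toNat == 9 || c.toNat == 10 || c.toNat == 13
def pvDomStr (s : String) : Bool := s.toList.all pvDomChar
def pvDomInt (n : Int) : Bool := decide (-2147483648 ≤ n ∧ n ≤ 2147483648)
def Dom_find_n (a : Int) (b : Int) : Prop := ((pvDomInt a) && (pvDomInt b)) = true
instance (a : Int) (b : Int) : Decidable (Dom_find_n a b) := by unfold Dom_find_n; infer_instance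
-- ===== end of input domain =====

-- B replaces A's step-by-step diagonal walk by the O(1) closed form (triangular
-- number of the diagonal plus in-diagonal offset); proved equal for 1 ≤ a, 1 ≤ b
-- (outside that, A's loop never terminates).


-- ===== PORT A =====
-- A's while-loop: the fuel is only a totality guard; the proof shows it is
-- never exhausted on inputs satisfying Pre_find_n.
def find_n_loop (a b : Int) : Nat → Int → Int → Int → Int
  | 0, _, _, cnt => cnt
  | fuel+1, x, y, cnt =>
    let x' := if y < 1 then 1 else x
    let y' := if y < 1 then x else y
    if x' = a ∧ y' = b then cnt
    else find_n_loop a b fuel (x' + 1) (y' - 1) (cnt + 1)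

def find_n (a : Int) (b : Int) : Int :=
  find_n_loop a b (((a + b) * (a + b)).toNat + 1) 1 1 1

-- ===== PORT B =====
def find_n_alt (a : Int) (b : Int) : Int :=
  let d := a + b - 2
  PySem.Int.floordiv (d * (d + 1)) 2 + a

-- ===== PRECONDITION & SPEC =====
-- A's loop terminates exactly when 1 ≤ a and 1 ≤ b (otherwise it runs forever).
def Pre_find_n (a : Int) (b : Int) : Prop := 1 ≤ a ∧ 1 ≤ b
instance (a : Int) (b : Int) : Decidable (Pre_find_n a b) := by unfold Pre_find_n; infer_instance
def pvWitness_find_n : Int × Int := (3, 2)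

def Spec_find_n (a : Int) (b : Int) (out : Int) : Prop := out = find_n_alt a b
instance (a : Int) (b : Int) (out : Int) : Decidable (Spec_find_n a b out) := by unfold Spec_find_n; infer_instance

-- ===== CLAIM (what is proved, stated in full; the proofs are below) =====
def Claim_equal_find_n : Prop := ∀ (a : Int) (b : Int), Dom_find_n a b → Pre_find_n a b → Spec_find_n a b (find_n a b)

-- ===== LEMMAS AND PROOFS =====

-- twice the 1-based position of cell (x,y) in the diagonal enumeration
def dpos (x y : Int) : Int := (x + y - 2) * (x + y - 1) + 2 * x

theorem dpos_lt {x y a b : Int} (hx : 1 ≤ x) (hy : 1 ≤ y) (ha : 1 ≤ a) (hb : 1 ≤ b)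
    (h : x + y < a + b) : dpos x y < dpos a b := by
  unfold dpos
  nlinarith [mul_nonneg (show (0:Int) ≤ a + b - 1 - (x + y) by omega)
    (show (0:Int) ≤ x + y + a + b - 3 by omega)]

theorem dpos_inj {x y a b : Int} (hx : 1 ≤ x) (hy : 1 ≤ y) (ha : 1 ≤ a) (hb : 1 ≤ b)
    (h : dpos x y = dpos a b) : x = a ∧ y = b := by
  rcases lt_trichotomy (x + y) (a + b) with h1 | h1 | h1
  · exact absurd h (ne_of_lt (dpos_lt hx hy ha hb h1))
  · have h2 : (x + y - 2) * (x + y - 1) = (a + b - 2) * (a + b - 1) := by rw [h1]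
    unfold dpos at h
    constructor <;> linarith
  · exact absurd h.symm (ne_of_lt (dpos_lt ha hb hx hy h1))

theorem find_n_loop_wrap (a b x cnt : Int) (f : Nat) (hx : 1 ≤ x) :
    find_n_loop a b (f + 1) x 0 cnt = find_n_loop a b (f + 1) 1 x cnt := by
  simp only [find_n_loop]
  have h0 : (0 : Int) < 1 := by norm_num
  have h1 : ¬ (x < 1) := by omega
  simp [h0, h1]

theorem loop_eq : ∀ (n : Nat) (a b x y cnt : Int) (fuel : Nat),
    1 ≤ a → 1 ≤ b → 1 ≤ x → 1 ≤ y →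
    2 * cnt = dpos x y → dpos a b - dpos x y = 2 * n → n < fuel →
    find_n_loop a b fuel x y cnt = cnt + n := by
  intro n
  induction n with
  | zero =>
    intro a b x y cnt fuel ha hb hx hy hc hd hf
    obtain ⟨f, rfl⟩ : ∃ f, fuel = f + 1 := ⟨fuel - 1, by omega⟩
    have heq : dpos x y = dpos a b := by omega
    obtain ⟨rfl, rfl⟩ := dpos_inj hx hy ha hb heq
    simp only [find_n_loop]
    have h1 : ¬ (y < 1) := by omega
    simp [h1]
  | succ n ih =>
    intro a b x y cnt fuel ha hb hx hy hc hd hf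
    obtain ⟨f, rfl⟩ : ∃ f, fuel = f + 1 := ⟨fuel - 1, by omega⟩
    have h1 : ¬ (y < 1) := by omega
    have hne : ¬ (x = a ∧ y = b) := by
      rintro ⟨rfl, rfl⟩; omega
    have hstep : find_n_loop a b (f + 1) x y cnt
        = find_n_loop a b f (x + 1) (y - 1) (cnt + 1) := by
      simp only [find_n_loop]
      simp [h1, hne]
    rw [hstep]
    by_cases hy2 : 2 ≤ y
    · -- same diagonal
      have hd2 : dpos (x + 1) (y - 1) = dpos x y + 2 := by unfold dpos; ring
      have := ih a b (x + 1) (y - 1) (cnt + 1) f ha hb (by omega) (by omega)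
        (by omega) (by omega) (by omega)
      rw [this]; push_cast; ring
    · -- y = 1: wrap to the next diagonal
      have hy1 : y = 1 := by omega
      subst hy1
      obtain ⟨g, rfl⟩ : ∃ g, f = g + 1 := ⟨f - 1, by omega⟩
      rw [show (1 : Int) - 1 = 0 by norm_num, find_n_loop_wrap a b (x + 1) (cnt + 1) g (by omega)]
      have hd2 : dpos 1 (x + 1) = dpos x 1 + 2 := by unfold dpos; ring
      have := ih a b 1 (x + 1) (cnt + 1) (g + 1) ha hb (by omega) (by omega)
        (by omega) (by omega) (by omega)
      rw [this]; push_cast; ring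

-- ===== VERDICT (by name: the statement is the Claim_ definition above) =====
theorem find_n_spec : Claim_equal_find_n := by
  unfold Claim_equal_find_n Spec_find_n
  intro a b _ hpre
  obtain ⟨ha, hb⟩ := hpre
  -- (a+b-2)(a+b-1) is even
  obtain ⟨k, hk⟩ : ∃ k, (a + b - 2) * (a + b - 1) = 2 * k := by
    have h := Int.even_mul_succ_self (a + b - 2)
    rw [show a + b - 2 + 1 = a + b - 1 by ring] at h
    obtain ⟨k, hk⟩ := h
    exact ⟨k, by omega⟩
  have hk0 : 0 ≤ k := by nlinarith [mul_nonneg (show (0:Int) ≤ a + b - 2 by omega) (show (0:Int) ≤ a + b - 1 by omega)]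
  have halt : find_n_alt a b = k + a := by
    show PySem.Int.floordiv ((a + b - 2) * ((a + b - 2) + 1)) 2 + a = k + a
    rw [show a + b - 2 + 1 = a + b - 1 by ring, hk,
      PySem.Int.floordiv_eq_ediv_of_pos (by norm_num),
      Int.mul_ediv_cancel_left _ (by norm_num)]
  set n : Nat := (k + a - 1).toNat with hn
  have hncast : (n : Int) = k + a - 1 := Int.toNat_of_nonneg (by omega)
  have hbound : (n : Int) ≤ (a + b) * (a + b) := by
    nlinarith [mul_nonneg (show (0:Int) ≤ a + b by omega) (show (0:Int) ≤ a + b by omega)]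
  have hfuel : n < ((a + b) * (a + b)).toNat + 1 := by
    have h2 : ((((a + b) * (a + b)).toNat : Nat) : Int) = (a + b) * (a + b) :=
      Int.toNat_of_nonneg (by positivity)
    omega
  have := loop_eq n a b 1 1 1 (((a + b) * (a + b)).toNat + 1) ha hb (by norm_num) (by norm_num)
    (by unfold dpos; ring) (by unfold dpos; omega) hfuel
  show find_n_loop a b (((a + b) * (a + b)).toNat + 1) 1 1 1 = find_n_alt a b
  rw [this, halt]; omega
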